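-- pv_equiv track=rewrite | github.com/abdessalem-aghrib/golomb-problem-metaheuristic-project | golomb_simulated_annealing.py | check_golomb_ruler
-- ===== SOURCE A (Python) =====
-- def check_golomb_ruler(solution):
--     size_variables = len(solution)
--
--     # check if first element is not 0
--     if solution[0] != 0: return False
--
--     # check if contains negative values
--     for item in solution:
--         if item < 0: return False
--
--     # check differences table
--     tab_diff = []
--
--     for i in range(size_variables-1):
--         d = solution[i+1]-solution[i]
--         if tab_diff.__contains__(d): return False
--         tab_diff.append(d)
--
--     index = size_variables - 2
--     diff_len = 2
--     for i in range(index,0,-1):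
--         for j in range(i):
--             d = 0
--             for k in range(diff_len):
--                 d += tab_diff[k+j]
--
--             if tab_diff.__contains__(d): return False
--             tab_diff.append(d)
--
--         diff_len +=1
--
--     # case of two identical marks
--     if tab_diff.__contains__(0): return False
--
--     return True
-- ===== SOURCE B (Python) =====
-- def check_golomb_ruler(solution):
--     if solution[0] != 0:
--         return False
--     if any(item < 0 for item in solution):
--         return False
--     n = len(solution)
--     seen = set()
--     for i in range(n):
--         for j in range(i + 1, n):
--             d = solution[j] - solution[i]
--             if d == 0 or d in seen:
--                 return False
--             seen.add(d)
--     return True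
-- ===== Notes on version B (the rewrite author's own statement) =====
-- stated objective: simpler
-- what changed: B drops A's consecutive-difference table and its triple-nested prefix-summation loops and instead checks a seen-set of directly computed differences solution[j]-solution[i] over all pairs i<j.
-- outside the precondition, e.g. on check_golomb_ruler([]): A raises IndexError, B raises IndexError
import Mathlib
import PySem

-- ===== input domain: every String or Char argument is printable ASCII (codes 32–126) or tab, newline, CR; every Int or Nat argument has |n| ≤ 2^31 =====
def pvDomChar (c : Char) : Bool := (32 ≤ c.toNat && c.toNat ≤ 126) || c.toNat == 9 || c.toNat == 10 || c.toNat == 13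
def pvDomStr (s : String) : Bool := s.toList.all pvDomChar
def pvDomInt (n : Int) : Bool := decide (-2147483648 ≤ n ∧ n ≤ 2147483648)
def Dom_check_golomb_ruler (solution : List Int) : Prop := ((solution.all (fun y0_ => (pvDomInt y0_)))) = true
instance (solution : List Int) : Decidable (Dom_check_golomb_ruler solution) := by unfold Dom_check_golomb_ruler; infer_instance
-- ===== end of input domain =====

-- B replaces A's consecutive-difference table and prefix-summation loops by a direct
-- double loop over all pairs i<j with a seen-set of differences (objective: simpler).

-- ===== PORT A =====
def check_golomb_ruler (solution : List Int) : Bool :=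
  let n : Int := solution.length
  -- solution[0]: in-range on Pre_ (solution ≠ []), so the total pyGetD form is exact there
  if PySem.List.pyGetD solution 0 0 ≠ 0 then false
  else if solution.any (fun item => item < 0) then false
  else
    -- first loop: consecutive differences, early return False on duplicate, modelled as Option state
    let phase1 : Option (List Int) :=
      (PySem.List.pyRange 0 (n - 1) 1).foldl
        (fun st i => st.bind (fun tab =>
          let d := PySem.List.pyGetD solution (i + 1) 0 - PySem.List.pyGetD solution i 0
          if tab.contains d then none else some (tab ++ [d])))
        (some [])
    -- nested loops: prefix sums of the difference table; state carries (tab_diff, diff_len)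
    let phase2 : Option (List Int × Int) :=
      (PySem.List.pyRange (n - 2) 0 (-1)).foldl
        (fun st i => st.bind (fun p =>
          ((PySem.List.pyRange 0 i 1).foldl
            (fun st2 j => st2.bind (fun tab =>
              let d := (PySem.List.pyRange 0 p.2 1).foldl
                         (fun acc k => acc + PySem.List.pyGetD tab (k + j) 0) 0
              if tab.contains d then none else some (tab ++ [d])))
            (some p.1)).map (fun tab => (tab, p.2 + 1))))
        (phase1.map (fun tab => (tab, 2)))
    match phase2 with
    | none => false
    | some p => !p.1.contains 0

-- ===== PORT B =====
def check_golomb_ruler_alt (solution : List Int) : Bool :=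
  -- solution[0]: in-range on Pre_ (solution ≠ []), so the total pyGetD form is exact there
  if PySem.List.pyGetD solution 0 0 ≠ 0 then false
  else if solution.any (fun item => item < 0) then false
  else
    let n : Int := solution.length
    let res : Option (PySem.Set Int) :=
      (PySem.List.pyRange 0 n 1).foldl
        (fun st i => st.bind (fun seen =>
          (PySem.List.pyRange (i + 1) n 1).foldl
            (fun st2 j => st2.bind (fun seen2 =>
              let d := PySem.List.pyGetD solution j 0 - PySem.List.pyGetD solution i 0
              if d = 0 || PySem.Set.contains seen2 d then none
              else some (PySem.Set.add seen2 d)))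
            (some seen)))
        (some PySem.Set.empty)
    res.isSome

-- ===== PRECONDITION & SPEC =====
-- Pre_ excludes only the empty list, on which Python A raises IndexError when accessing the first element (B raises there too).
def Pre_check_golomb_ruler (solution : List Int) : Prop := solution ≠ []
instance (solution : List Int) : Decidable (Pre_check_golomb_ruler solution) := by unfold Pre_check_golomb_ruler; infer_instance
def pvWitness_check_golomb_ruler : List Int := [0, 1, 3]
def Spec_check_golomb_ruler (solution : List Int) (out : Bool) : Prop := out = check_golomb_ruler_alt solution
instance (solution : List Int) (out : Bool) : Decidable (Spec_check_golomb_ruler solution out) := by unfold Spec_check_golomb_ruler; infer_instance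

-- ===== CLAIM (what is proved, stated in full; the proofs are below) =====
def Claim_equal_check_golomb_ruler : Prop := ∀ (solution : List Int), Dom_check_golomb_ruler solution → Pre_check_golomb_ruler solution → Spec_check_golomb_ruler solution (check_golomb_ruler solution)

-- ===== LEMMAS AND PROOFS =====

-- A's duplicate-checking append loop and B's set-scanning loop, abstracted over the scanned values
def pvStep (st : Option (List Int)) (d : Int) : Option (List Int) :=
  st.bind (fun t => if t.contains d then none else some (t ++ [d]))
def pvRun (tab xs : List Int) : Option (List Int) := xs.foldl pvStep (some tab)
def pvStepB (st : Option (List Int)) (d : Int) : Option (List Int) :=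
  st.bind (fun s => if d = 0 || PySem.Set.contains s d then none else some (PySem.Set.add s d))
def pvRunB (s xs : List Int) : Option (List Int) := xs.foldl pvStepB (some s)

-- consecutive differences of s, window sums over them, pair enumerations in each program's order
def pvCD (s : List Int) : List Int :=
  (List.range (s.length - 1)).map (fun j => s.getD (j + 1) 0 - s.getD j 0)
def pvWsum (c : List Int) (L j : Nat) : Int :=
  ((List.range L).map (fun k => c.getD (k + j) 0)).sum
def pvRow (c : List Int) (n i : Nat) : List Int :=
  (List.range i).map (fun j => pvWsum c (n - i) j)
def pvW (c : List Int) (n : Nat) : Nat → List Int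
  | 0 => []
  | i + 1 => pvRow c n (i + 1) ++ pvW c n i
def pvF (s : List Int) (p : Nat × Nat) : Int := s.getD p.2 0 - s.getD p.1 0
def pvRowP (n i : Nat) : List (Nat × Nat) := (List.range i).map (fun j => (j, j + (n - i)))
def pvWP (n : Nat) : Nat → List (Nat × Nat)
  | 0 => []
  | i + 1 => pvRowP n (i + 1) ++ pvWP n i
def pvPairsA (n : Nat) : List (Nat × Nat) :=
  (List.range (n - 1)).map (fun j => (j, j + 1)) ++ pvWP n (n - 2)
def pvPairsB (n : Nat) : List (Nat × Nat) :=
  (List.range n).flatMap (fun i => (List.range (n - 1 - i)).map (fun k => (i, i + 1 + k)))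

lemma pvRun_none (xs : List Int) : xs.foldl pvStep none = none := by
  induction xs with
  | nil => rfl
  | cons x xs ih => simpa [pvStep] using ih

lemma pvRun_append (tab xs ys : List Int) :
    pvRun tab (xs ++ ys) = (pvRun tab xs).bind (fun t => pvRun t ys) := by
  unfold pvRun
  rw [List.foldl_append]
  cases h : xs.foldl pvStep (some tab) with
  | none => simp [pvRun_none]
  | some t => simp

lemma pvRun_char (tab xs : List Int) (h : tab.Nodup) :
    pvRun tab xs = if (tab ++ xs).Nodup then some (tab ++ xs) else none := by
  induction xs generalizing tab with
  | nil => simp [pvRun, h]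
  | cons x xs ih =>
    show xs.foldl pvStep (pvStep (some tab) x) = _
    by_cases hx : x ∈ tab
    · rw [show pvStep (some tab) x = none by simp [pvStep, hx], pvRun_none]
      rw [if_neg]
      intro hnd
      rcases (List.nodup_append.mp hnd) with ⟨_, _, hdisj⟩
      exact hdisj x hx x (by simp) rfl
    · rw [show pvStep (some tab) x = some (tab ++ [x]) by simp [pvStep, hx]]
      have h2 : (tab ++ [x]).Nodup := by
        simp [List.nodup_append, h]
        intro a ha hax; exact hx (hax ▸ ha)
      have := ih (tab ++ [x]) h2
      unfold pvRun at this
      rw [this]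
      simp [List.append_assoc]

lemma pvRunB_none (xs : List Int) : xs.foldl pvStepB none = none := by
  induction xs with
  | nil => rfl
  | cons x xs ih => simpa [pvStepB] using ih

lemma pvRunB_append (s xs ys : List Int) :
    pvRunB s (xs ++ ys) = (pvRunB s xs).bind (fun t => pvRunB t ys) := by
  unfold pvRunB
  rw [List.foldl_append]
  cases h : xs.foldl pvStepB (some s) with
  | none => simp [pvRunB_none]
  | some t => simp

lemma pvRunB_char (s xs : List Int) (h : s.Nodup) :
    pvRunB s xs = if (s ++ xs).Nodup ∧ (0 : Int) ∉ xs then some (s ++ xs) else none := by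
  induction xs generalizing s with
  | nil => simp [pvRunB, h]
  | cons x xs ih =>
    show xs.foldl pvStepB (pvStepB (some s) x) = _
    by_cases hx0 : x = 0
    · rw [show pvStepB (some s) x = none by simp [pvStepB, hx0], pvRunB_none]
      rw [if_neg]
      rintro ⟨-, hmem⟩
      exact hmem (by simp [hx0])
    · by_cases hx : x ∈ s
      · rw [show pvStepB (some s) x = none by
          simp [pvStepB, hx], pvRunB_none]
        rw [if_neg]
        rintro ⟨hnd, -⟩
        rcases List.nodup_append.mp hnd with ⟨-, -, hdisj⟩
        exact hdisj x hx x (by simp) rfl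
      · have hadd : pvStepB (some s) x = some (s ++ [x]) := by
          simp [pvStepB, hx, hx0, PySem.Set.add]
        rw [hadd]
        have h2 : (s ++ [x]).Nodup := by
          simp [List.nodup_append, h]
          intro a ha hax; exact hx (hax ▸ ha)
        have := ih (s ++ [x]) h2
        unfold pvRunB at this
        rw [this]
        by_cases hc : ((s ++ [x]) ++ xs).Nodup ∧ (0:Int) ∉ xs
        · rw [if_pos hc, if_pos (by
            constructor
            · simpa [List.append_assoc] using hc.1
            · simp [hc.2]
              exact fun h' => hx0 h'.symm), List.append_assoc]
          rfl
        · rw [if_neg hc, if_neg]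
          intro hc2
          exact hc ⟨by simpa [List.append_assoc] using hc2.1, fun hm => hc2.2 (by simp [hm])⟩

lemma pvGetD_prefix (c tab : List Int) (hp : c <+: tab) (k : Nat) (hk : k < c.length) :
    tab.getD k 0 = c.getD k 0 := by
  rcases hp with ⟨t, rfl⟩
  rw [List.getD_append _ _ _ _ hk]

lemma pvCD_getD (s : List Int) (j : Nat) (hj : j < s.length - 1) :
    (pvCD s).getD j 0 = s.getD (j + 1) 0 - s.getD j 0 := by
  unfold pvCD
  rw [PySem.List.getD_map_range]
  exact hj

lemma pvCD_length (s : List Int) : (pvCD s).length = s.length - 1 := by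
  simp [pvCD]

lemma pvWsum_eq (s : List Int) (L j : Nat) (h : j + L ≤ s.length - 1) :
    pvWsum (pvCD s) L j = s.getD (j + L) 0 - s.getD j 0 := by
  induction L with
  | zero => simp [pvWsum]
  | succ L ih =>
    unfold pvWsum
    rw [List.range_succ, List.map_append, List.sum_append]
    have hL : j + L < s.length - 1 := by omega
    have := ih (by omega)
    unfold pvWsum at this
    rw [this]
    simp only [List.map_cons, List.map_nil, List.sum_cons, List.sum_nil]
    rw [pvCD_getD s (L + j) (by omega)]
    have : L + j + 1 = j + (L+1) := by omega
    rw [this]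
    have : L + j = j + L := by omega
    rw [this]
    ring

lemma pvD_eq (c tab2 : List Int) (hc : c <+: tab2) (L j0 : Nat) (hj : j0 + L ≤ c.length) :
    (PySem.List.pyRange 0 (L : Int) 1).foldl
      (fun acc k => acc + PySem.List.pyGetD tab2 (k + (j0 : Int)) 0) 0 = pvWsum c L j0 := by
  rw [PySem.List.pyRange_zero_nat L, List.foldl_map]
  rw [PySem.List.foldl_add]
  unfold pvWsum
  rw [zero_add]
  congr 1
  apply List.map_congr_left
  intro k hk
  rw [List.mem_range] at hk
  have h1 : ((k : Int) + (j0 : Int)) = ((k + j0 : Nat) : Int) := by push_cast; ring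
  rw [h1, PySem.List.pyGetD_natCast]
  have h2 : k + j0 < c.length := by omega
  exact pvGetD_prefix c tab2 hc (k + j0) h2

lemma foldl_bind_none {α β : Type} (l : List α) (f : α → β → Option β) :
    l.foldl (fun st x => Option.bind st (f x)) (none : Option β) = none := by
  induction l with
  | nil => rfl
  | cons x l ih => simpa using ih

lemma inner_loop (c : List Int) (L i : Nat) (hiL : i + L ≤ c.length + 1) :
    ∀ (m j0 : Nat), j0 + m = i → ∀ (tab : List Int), c <+: tab →
    (PySem.List.pyRange (j0 : Int) (i : Int) 1).foldl
      (fun st2 j => st2.bind (fun tab2 =>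
        let d := (PySem.List.pyRange 0 (L : Int) 1).foldl
                   (fun acc k => acc + PySem.List.pyGetD tab2 (k + j) 0) 0
        if tab2.contains d then none else some (tab2 ++ [d])))
      (some tab)
    = pvRun tab ((List.range m).map (fun k => pvWsum c L (j0 + k))) := by
  intro m
  induction m with
  | zero =>
    intro j0 hj0 tab hc
    have : (i : Int) ≤ (j0 : Int) := by omega
    rw [PySem.List.pyRange_one_eq_nil this]
    simp [pvRun]
  | succ m ih =>
    intro j0 hj0 tab hc
    have hlt : (j0 : Int) < (i : Int) := by omega
    rw [PySem.List.pyRange_one_cons hlt, List.foldl_cons]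
    have hd : (PySem.List.pyRange 0 (L : Int) 1).foldl
        (fun acc k => acc + PySem.List.pyGetD tab (k + (j0 : Int)) 0) 0 = pvWsum c L j0 :=
      pvD_eq c tab hc L j0 (by omega)
    have hrange : (List.range (m + 1)).map (fun k => pvWsum c L (j0 + k))
        = pvWsum c L j0 :: (List.range m).map (fun k => pvWsum c L ((j0 + 1) + k)) := by
      rw [List.range_succ_eq_map, List.map_cons, List.map_map]
      simp only [Nat.add_zero]
      congr 1
      apply List.map_congr_left
      intro k _
      simp only [Function.comp_apply]
      congr 1
      omega
    rw [hrange]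
    show _ = ((List.range m).map fun k => pvWsum c L (j0 + 1 + k)).foldl pvStep
        (pvStep (some tab) (pvWsum c L j0))
    by_cases hmem : tab.contains (pvWsum c L j0)
    · simp only [hd, hmem, if_true, Option.bind_some]
      rw [show pvStep (some tab) (pvWsum c L j0) = none by simp_all [pvStep], pvRun_none]
      exact foldl_bind_none _ _
    · simp only [hd, hmem, Option.bind_some]
      rw [show pvStep (some tab) (pvWsum c L j0) = some (tab ++ [pvWsum c L j0]) by
        simp_all [pvStep]]
      exact ih (j0 + 1) (by omega) (tab ++ [pvWsum c L j0]) (hc.trans (List.prefix_append _ _))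

lemma pvRun_some_eq (tab xs t : List Int) (h : pvRun tab xs = some t) : t = tab ++ xs := by
  induction xs generalizing tab with
  | nil => simp [pvRun] at h; simp [h]
  | cons x xs ih =>
    have hstep : pvRun tab (x :: xs) = xs.foldl pvStep (pvStep (some tab) x) := rfl
    rw [hstep] at h
    by_cases hx : x ∈ tab
    · rw [show pvStep (some tab) x = none by simp [pvStep, hx], pvRun_none] at h
      exact absurd h (by simp)
    · rw [show pvStep (some tab) x = some (tab ++ [x]) by simp [pvStep, hx]] at h
      have := ih (tab ++ [x]) h
      simpa [List.append_assoc] using this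

lemma phase2_loop (c : List Int) (n' : Nat) (hn : c.length + 1 = n') :
    ∀ (i : Nat), i ≤ n' - 2 → ∀ (tab : List Int), c <+: tab →
    (PySem.List.pyRange (i : Int) 0 (-1)).foldl
      (fun st i => st.bind (fun p =>
        ((PySem.List.pyRange 0 i 1).foldl
          (fun st2 j => st2.bind (fun tab2 =>
            let d := (PySem.List.pyRange 0 p.2 1).foldl
                       (fun acc k => acc + PySem.List.pyGetD tab2 (k + j) 0) 0
            if tab2.contains d then none else some (tab2 ++ [d])))
          (some p.1)).map (fun tab2 => (tab2, p.2 + 1))))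
      (some (tab, ((n' : Int) - (i : Int))))
    = (pvRun tab (pvW c n' i)).map (fun t => (t, (n' : Int))) := by
  intro i
  induction i with
  | zero =>
    intro _ tab hc
    rw [PySem.List.pyRange_neg_one_eq_nil (by omega)]
    simp [pvW, pvRun]
  | succ i ih =>
    intro hi tab hc
    have hcons : PySem.List.pyRange ((i + 1 : Nat) : Int) 0 (-1)
        = ((i + 1 : Nat) : Int) :: PySem.List.pyRange (i : Int) 0 (-1) := by
      have harr : ((i + 1 : Nat) : Int) - 1 = (i : Int) := by push_cast; ring
      rw [PySem.List.pyRange_neg_one_cons (by omega), harr]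
    rw [hcons, List.foldl_cons]
    simp only [Option.bind_some]
    have hL : ((n' : Int) - ((i + 1 : Nat) : Int)) = ((n' - (i + 1) : Nat) : Int) := by
      push_cast; omega
    rw [hL]
    have hinner := inner_loop c (n' - (i + 1)) (i + 1) (by omega) (i + 1) 0 (by omega) tab hc
    simp only [Nat.zero_add, Nat.cast_zero] at hinner
    rw [hinner]
    have hrow : (List.range (i + 1)).map (fun k => pvWsum c (n' - (i + 1)) k)
        = pvRow c n' (i + 1) := rfl
    rw [hrow]
    cases hres : pvRun tab (pvRow c n' (i + 1)) with
    | none =>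
      simp only [Option.map_none]
      rw [foldl_bind_none]
      rw [show pvW c n' (i + 1) = pvRow c n' (i + 1) ++ pvW c n' i from rfl,
          pvRun_append, hres]
      simp
    | some t =>
      simp only [Option.map_some]
      have ht : t = tab ++ pvRow c n' (i + 1) := pvRun_some_eq _ _ _ hres
      have hct : c <+: t := ht ▸ hc.trans (List.prefix_append _ _)
      have harith : ((n' - (i + 1) : Nat) : Int) + 1 = (n' : Int) - (i : Int) := by
        omega
      rw [harith]
      rw [ih (by omega) t hct]
      rw [show pvW c n' (i + 1) = pvRow c n' (i + 1) ++ pvW c n' i from rfl,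
          pvRun_append, hres]
      simp

lemma phase1_eq (s : List Int) (hs : s ≠ []) :
    (PySem.List.pyRange 0 ((s.length : Int) - 1) 1).foldl
      (fun st i => st.bind (fun tab =>
        let d := PySem.List.pyGetD s (i + 1) 0 - PySem.List.pyGetD s i 0
        if tab.contains d then none else some (tab ++ [d])))
      (some [])
    = pvRun [] (pvCD s) := by
  have hpos : 0 < s.length := List.length_pos_of_ne_nil hs
  have h1 : ((s.length : Int) - 1) = ((s.length - 1 : Nat) : Int) := by omega
  rw [h1, PySem.List.pyRange_zero_nat, List.foldl_map]
  unfold pvRun pvCD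
  rw [List.foldl_map]
  congr 1
  funext st k
  simp only [pvStep]
  have e1 : ((k : Int) + 1) = ((k + 1 : Nat) : Int) := by push_cast; ring
  rw [e1, PySem.List.pyGetD_natCast, PySem.List.pyGetD_natCast]

lemma A_core (s : List Int) (hs2 : 2 ≤ s.length) :
    check_golomb_ruler s =
      (if PySem.List.pyGetD s 0 0 ≠ 0 then false
       else if s.any (fun item => item < 0) then false
       else
         match pvRun [] (pvCD s ++ pvW (pvCD s) s.length (s.length - 2)) with
         | none => false
         | some t => !t.contains 0) := by
  unfold check_golomb_ruler
  by_cases h1 : PySem.List.pyGetD s 0 0 ≠ 0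
  · rw [if_pos h1, if_pos h1]
  · rw [if_neg h1, if_neg h1]
    by_cases h2 : s.any (fun item => item < 0) = true
    · rw [if_pos h2, if_pos h2]
    · rw [if_neg h2, if_neg h2]
      have hs : s ≠ [] := by intro h; rw [h] at hs2; simp at hs2
      rw [phase1_eq s hs]
      cases hc : pvRun [] (pvCD s) with
      | none =>
        simp only [Option.map_none]
        rw [foldl_bind_none, pvRun_append, hc]
        simp
      | some tab =>
        have htab : tab = pvCD s := by simpa using pvRun_some_eq _ _ _ hc
        subst htab
        simp only [Option.map_some]
        have hcast : ((s.length : Int) - 2) = (((s.length - 2 : Nat)) : Int) := by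
          omega
        have hsnd : (2 : Int) = (s.length : Int) - ((s.length - 2 : Nat) : Int) := by
          omega
        rw [hcast, hsnd, phase2_loop (pvCD s) s.length (by rw [pvCD_length]; omega)
              (s.length - 2) (by omega) (pvCD s) (List.prefix_refl _)]
        rw [pvRun_append, hc]
        cases hw : pvRun (pvCD s) (pvW (pvCD s) s.length (s.length - 2)) with
        | none => simp [hw]
        | some t => simp [hw]

lemma B_inner (s : List Int) (i' : Nat) (seen : List Int) :
    (PySem.List.pyRange ((i' : Int) + 1) (s.length : Int) 1).foldl
      (fun st2 j => st2.bind (fun seen2 =>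
        let d := PySem.List.pyGetD s j 0 - PySem.List.pyGetD s (i' : Int) 0
        if d = 0 || PySem.Set.contains seen2 d then none
        else some (PySem.Set.add seen2 d)))
      (some seen)
    = pvRunB seen ((List.range (s.length - 1 - i')).map (fun k => pvF s (i', i' + 1 + k))) := by
  rw [PySem.List.pyRange_one, List.foldl_map]
  unfold pvRunB
  rw [List.foldl_map]
  have hlen : ((s.length : Int) - ((i' : Int) + 1)).toNat = s.length - 1 - i' := by omega
  rw [hlen]
  congr 1
  funext st k
  simp only [pvStepB, pvF]
  have e1 : ((i' : Int) + 1 + (k : Int)) = ((i' + 1 + k : Nat) : Int) := by push_cast; ring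
  rw [e1, PySem.List.pyGetD_natCast, PySem.List.pyGetD_natCast]
  rfl

lemma runB_flat_map {α : Type} (l : List α) (f : α → List Int) : ∀ seen : List Int,
    l.foldl (fun st a => st.bind (fun sn => pvRunB sn (f a))) (some seen)
    = pvRunB seen (l.flatMap f) := by
  induction l with
  | nil => intro seen; simp [pvRunB]
  | cons a l ih =>
    intro seen
    rw [List.flatMap_cons, pvRunB_append, List.foldl_cons]
    simp only [Option.bind_some]
    cases hr : pvRunB seen (f a) with
    | none => rw [foldl_bind_none]; simp
    | some t => rw [ih t]; simp

lemma B_core (s : List Int) :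
    check_golomb_ruler_alt s =
      (if PySem.List.pyGetD s 0 0 ≠ 0 then false
       else if s.any (fun item => item < 0) then false
       else (pvRunB [] ((pvPairsB s.length).map (pvF s))).isSome) := by
  unfold check_golomb_ruler_alt
  by_cases h1 : PySem.List.pyGetD s 0 0 ≠ 0
  · rw [if_pos h1, if_pos h1]
  · rw [if_neg h1, if_neg h1]
    by_cases h2 : s.any (fun item => item < 0) = true
    · rw [if_pos h2, if_pos h2]
    · rw [if_neg h2, if_neg h2]
      simp only []
      rw [PySem.List.pyRange_zero_nat, List.foldl_map]
      have hbody : (fun (st : Option (PySem.Set Int)) (i' : Nat) => st.bind (fun seen =>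
          (PySem.List.pyRange ((i' : Int) + 1) (s.length : Int) 1).foldl
            (fun st2 j => st2.bind (fun seen2 =>
              let d := PySem.List.pyGetD s j 0 - PySem.List.pyGetD s (i' : Int) 0
              if d = 0 || PySem.Set.contains seen2 d then none
              else some (PySem.Set.add seen2 d)))
            (some seen)))
          = (fun st i' => st.bind (fun seen =>
              pvRunB seen ((List.range (s.length - 1 - i')).map (fun k => pvF s (i', i' + 1 + k))))) := by
        funext st i'
        congr 1
        funext seen
        exact B_inner s i' seen
      rw [hbody]
      rw [show (PySem.Set.empty : List Int) = [] from rfl]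
      rw [runB_flat_map (List.range s.length)
            (fun i' => (List.range (s.length - 1 - i')).map (fun k => pvF s (i', i' + 1 + k))) []]
      congr 2
      unfold pvPairsB
      rw [List.map_flatMap]
      congr 1
      funext i'
      rw [List.map_map]
      rfl

lemma pvW_map (s : List Int) : ∀ i, i ≤ s.length - 2 →
    pvW (pvCD s) s.length i = (pvWP s.length i).map (pvF s) := by
  intro i
  induction i with
  | zero => intro _; rfl
  | succ i ih =>
    intro hi
    show pvRow (pvCD s) s.length (i + 1) ++ pvW (pvCD s) s.length i
        = (pvRowP s.length (i + 1) ++ pvWP s.length i).map (pvF s)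
    rw [List.map_append, ih (by omega)]
    congr 1
    unfold pvRow pvRowP
    rw [List.map_map]
    apply List.map_congr_left
    intro j hj
    rw [List.mem_range] at hj
    simp only [Function.comp_apply]
    rw [pvWsum_eq s (s.length - (i + 1)) j (by omega)]
    rfl

lemma pvCD_map (s : List Int) :
    pvCD s = ((List.range (s.length - 1)).map (fun j => (j, j + 1))).map (pvF s) := by
  unfold pvCD
  rw [List.map_map]
  rfl

lemma pvDall_eq (s : List Int) :
    pvCD s ++ pvW (pvCD s) s.length (s.length - 2) = (pvPairsA s.length).map (pvF s) := by
  unfold pvPairsA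
  rw [List.map_append, ← pvCD_map, pvW_map s (s.length - 2) (by omega)]

lemma pvWP_mem (n : Nat) : ∀ i, ∀ p : Nat × Nat,
    p ∈ pvWP n i ↔ ∃ i' j, 1 ≤ i' ∧ i' ≤ i ∧ j < i' ∧ p = (j, j + (n - i')) := by
  intro i
  induction i with
  | zero => intro p; simp [pvWP]
  | succ i ih =>
    intro p
    show p ∈ pvRowP n (i + 1) ++ pvWP n i ↔ _
    rw [List.mem_append, ih]
    constructor
    · rintro (hrow | ⟨i', j, h1, h2, h3, h4⟩)
      · simp only [pvRowP, List.mem_map, List.mem_range] at hrow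
        obtain ⟨j, hj, hp⟩ := hrow
        exact ⟨i + 1, j, by omega, by omega, hj, hp.symm⟩
      · exact ⟨i', j, h1, by omega, h3, h4⟩
    · rintro ⟨i', j, h1, h2, h3, h4⟩
      by_cases hii : i' = i + 1
      · left
        simp only [pvRowP, List.mem_map, List.mem_range]
        exact ⟨j, by omega, by rw [h4, hii]⟩
      · right
        exact ⟨i', j, h1, by omega, h3, h4⟩

lemma pvWP_nodup (n : Nat) : ∀ i, i ≤ n - 2 → (pvWP n i).Nodup := by
  intro i
  induction i with
  | zero => intro _; simp [pvWP]
  | succ i ih =>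
    intro hi
    show (pvRowP n (i + 1) ++ pvWP n i).Nodup
    rw [List.nodup_append]
    refine ⟨?_, ih (by omega), ?_⟩
    · apply List.Nodup.map ?_ (List.nodup_range)
      intro a b hab
      simpa using congrArg Prod.fst hab
    · intro p hp q hq
      simp only [pvRowP, List.mem_map, List.mem_range] at hp
      obtain ⟨j, hj, hpj⟩ := hp
      rw [pvWP_mem] at hq
      obtain ⟨i', j', h1, h2, h3, h4⟩ := hq
      rw [← hpj, h4]
      intro h
      have e1 := congrArg Prod.fst h
      have e2 := congrArg Prod.snd h
      simp at e1 e2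
      omega

lemma pvPairsA_mem (n : Nat) (hn : 2 ≤ n) (p : Nat × Nat) :
    p ∈ pvPairsA n ↔ p.1 < p.2 ∧ p.2 < n := by
  unfold pvPairsA
  rw [List.mem_append, pvWP_mem]
  constructor
  · rintro (hrow | ⟨i', j, h1, h2, h3, h4⟩)
    · simp only [List.mem_map, List.mem_range] at hrow
      obtain ⟨j, hj, hp⟩ := hrow
      rw [← hp]
      simp
      omega
    · rw [h4]
      simp
      omega
  · rintro ⟨h1, h2⟩
    obtain ⟨a, b⟩ := p
    simp only at h1 h2
    by_cases hb : b = a + 1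
    · left
      simp only [List.mem_map, List.mem_range]
      exact ⟨a, by omega, by rw [hb]⟩
    · right
      refine ⟨n - (b - a), a, by omega, by omega, by omega, ?_⟩
      have : a + (n - (n - (b - a))) = b := by omega
      rw [this]

lemma pvPairsA_nodup (n : Nat) : (pvPairsA n).Nodup := by
  unfold pvPairsA
  rw [List.nodup_append]
  refine ⟨?_, pvWP_nodup n (n - 2) (by omega), ?_⟩
  · apply List.Nodup.map ?_ (List.nodup_range)
    intro a b hab
    simpa using congrArg Prod.fst hab
  · intro p hp q hq
    simp only [List.mem_map, List.mem_range] at hp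
    obtain ⟨j, hj, hpj⟩ := hp
    rw [pvWP_mem] at hq
    obtain ⟨i', j', h1, h2, h3, h4⟩ := hq
    rw [← hpj, h4]
    intro h
    have e1 := congrArg Prod.fst h
    have e2 := congrArg Prod.snd h
    simp at e1 e2
    omega

lemma pvPairsB_mem (n : Nat) (p : Nat × Nat) :
    p ∈ pvPairsB n ↔ p.1 < p.2 ∧ p.2 < n := by
  unfold pvPairsB
  simp only [List.mem_flatMap, List.mem_map, List.mem_range]
  constructor
  · rintro ⟨i, hi, k, hk, hp⟩
    rw [← hp]
    simp
    omega
  · rintro ⟨h1, h2⟩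
    obtain ⟨a, b⟩ := p
    simp only at h1 h2
    exact ⟨a, by omega, b - a - 1, by omega, by simp; omega⟩

lemma pvPairsB_nodup (n : Nat) : (pvPairsB n).Nodup := by
  unfold pvPairsB
  rw [List.flatMap_def, List.nodup_flatten]
  constructor
  · intro l hl
    simp only [List.mem_map, List.mem_range] at hl
    obtain ⟨i, hi, hl⟩ := hl
    rw [← hl]
    apply List.Nodup.map ?_ (List.nodup_range)
    intro a b hab
    simpa using congrArg Prod.snd hab
  · refine List.Pairwise.map _ ?_ List.pairwise_lt_range
    intro i i' hlt p hp hq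
    simp only [List.mem_map, List.mem_range] at hp hq
    obtain ⟨k, hk, hp⟩ := hp
    obtain ⟨k', hk', hq⟩ := hq
    have := congrArg Prod.fst hp
    have := congrArg Prod.fst hq
    simp_all

lemma pvPairs_perm (n : Nat) (hn : 2 ≤ n) : (pvPairsA n).Perm (pvPairsB n) := by
  exact (List.perm_ext_iff_of_nodup (pvPairsA_nodup n) (pvPairsB_nodup n)).mpr
    (fun p => by rw [pvPairsA_mem n hn, pvPairsB_mem])

theorem main_eq (s : List Int) (hs : s ≠ []) : check_golomb_ruler s = check_golomb_ruler_alt s := by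
  rcases Nat.lt_or_ge s.length 2 with hlen | hlen
  · cases s with
    | nil => exact absurd rfl hs
    | cons a t =>
      cases t with
      | nil =>
        by_cases ha : a = 0
        · subst ha; decide
        · simp [check_golomb_ruler, check_golomb_ruler_alt, PySem.List.pyGetD_zero_cons, ha]
      | cons b t' => simp at hlen
  · rw [A_core s hlen, B_core s]
    by_cases h1 : PySem.List.pyGetD s 0 0 ≠ 0
    · rw [if_pos h1, if_pos h1]
    · rw [if_neg h1, if_neg h1]
      by_cases h2 : s.any (fun item => item < 0) = true
      · rw [if_pos h2, if_pos h2]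
      · rw [if_neg h2, if_neg h2]
        rw [pvDall_eq s]
        have hperm : ((pvPairsA s.length).map (pvF s)).Perm ((pvPairsB s.length).map (pvF s)) :=
          (pvPairs_perm s.length hlen).map _
        rw [pvRun_char [] _ List.nodup_nil, pvRunB_char [] _ List.nodup_nil]
        simp only [List.nil_append]
        by_cases hnd : ((pvPairsA s.length).map (pvF s)).Nodup
        · rw [if_pos hnd]
          by_cases h0 : (0 : Int) ∈ (pvPairsA s.length).map (pvF s)
          · rw [if_neg (fun hc => hc.2 (hperm.mem_iff.mp h0))]
            simp [h0]
          · rw [if_pos ⟨hperm.nodup_iff.mp hnd, fun hc => h0 (hperm.mem_iff.mpr hc)⟩]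
            simp [h0]
        · rw [if_neg hnd, if_neg (fun hc => hnd (hperm.nodup_iff.mpr hc.1))]
          rfl

-- ===== VERDICT (by name: the statement is the Claim_ definition above) =====
theorem check_golomb_ruler_spec : Claim_equal_check_golomb_ruler := by
  unfold Claim_equal_check_golomb_ruler Spec_check_golomb_ruler
  intro s _ hpre
  exact main_eq s hpre
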